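-- pv_equiv track=rewrite | github.com/viniciushammett/sre-agent-k8s | monitoring/cluster_watcher.py | detect_state_changes
-- ===== SOURCE A (Python) =====
-- def detect_state_changes(previous: dict, current: dict) -> list:
--     """
--     Compara dois snapshots e retorna apenas os pods que mudaram de estado.
--
--     Detecta três tipos de mudança:
--       - estado alterado: pod existia antes e agora, mas status diferente
--       - pod novo:        pod não existia no snapshot anterior (previous_status=None)
--       - pod removido:    pod desapareceu do snapshot atual (current_status=None)
--
--     Args:
--         previous: snapshot anterior {pod_name: parsed_status}
--         current:  snapshot atual    {pod_name: parsed_status}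
--
--     Returns:
--         lista de dicts com campos: pod_name, previous_status, current_status.
--         Retorna [] se não houver mudanças.
--     """
--     changes = []
--     for pod_name in sorted(set(previous) | set(current)):
--         prev_status = previous.get(pod_name)
--         curr_status = current.get(pod_name)
--         if prev_status != curr_status:
--             changes.append({
--                 "pod_name": pod_name,
--                 "previous_status": prev_status,
--                 "current_status": curr_status,
--             })
--     return changes
-- ===== SOURCE B (Python) =====
-- def detect_state_changes(previous: dict, current: dict) -> list:
--     # Two-pointer merge of the two key-sorted item lists: emits change records
--     # directly in pod-name order, with no key-union set and no final sort.
--     pi = sorted(previous.items(), key=lambda kv: kv[0])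
--     ci = sorted(current.items(), key=lambda kv: kv[0])
--     out = []
--     i = j = 0
--     while i < len(pi) and j < len(ci):
--         pk, pv = pi[i]
--         ck, cv = ci[j]
--         if pk < ck:                      # pod removed
--             out.append({"pod_name": pk, "previous_status": pv, "current_status": None})
--             i += 1
--         elif ck < pk:                    # pod added
--             out.append({"pod_name": ck, "previous_status": None, "current_status": cv})
--             j += 1
--         else:                            # present in both
--             if pv != cv:
--                 out.append({"pod_name": pk, "previous_status": pv, "current_status": cv})
--             i += 1
--             j += 1
--     while i < len(pi):                   # remaining removed pods
--         pk, pv = pi[i]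
--         out.append({"pod_name": pk, "previous_status": pv, "current_status": None})
--         i += 1
--     while j < len(ci):                   # remaining added pods
--         ck, cv = ci[j]
--         out.append({"pod_name": ck, "previous_status": None, "current_status": cv})
--         j += 1
--     return out
-- ===== Notes on version B (the rewrite author's own statement) =====
-- stated objective: alternative
-- what changed: Replaces A's scan over the sorted union of key sets with a two-pointer merge of the two key-sorted item lists, emitting change records directly in pod-name order with no key-union set and no final sort over records.
import Mathlib
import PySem

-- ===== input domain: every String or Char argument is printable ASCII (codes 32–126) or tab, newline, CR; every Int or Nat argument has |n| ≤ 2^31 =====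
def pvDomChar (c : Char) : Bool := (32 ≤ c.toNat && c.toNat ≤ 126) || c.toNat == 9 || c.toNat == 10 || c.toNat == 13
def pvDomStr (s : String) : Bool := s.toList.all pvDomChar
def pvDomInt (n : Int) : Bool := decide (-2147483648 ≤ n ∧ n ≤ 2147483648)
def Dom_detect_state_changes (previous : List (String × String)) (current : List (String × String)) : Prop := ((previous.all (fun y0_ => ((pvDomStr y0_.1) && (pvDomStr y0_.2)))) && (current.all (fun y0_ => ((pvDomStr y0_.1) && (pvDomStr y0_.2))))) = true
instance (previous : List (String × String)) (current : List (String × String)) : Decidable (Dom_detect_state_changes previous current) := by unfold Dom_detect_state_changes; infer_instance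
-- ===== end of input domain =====

-- B replaces A's scan over the sorted union of key sets by a two-pointer merge of
-- the two key-sorted item lists (objective: alternative algorithm, same cost).
-- ===== PORT A =====
def detect_state_changes (previous : List (String × String)) (current : List (String × String)) : List (List (String × Option String)) :=
  let pd := PySem.Dict.ofList previous
  let cd := PySem.Dict.ofList current
  let keys := PySem.List.sorted (PySem.Set.union (PySem.Set.ofList pd.keys) (PySem.Set.ofList cd.keys)) (fun x => x) false
  keys.foldl (fun changes pod_name =>
    let prev_status := pd.get? pod_name
    let curr_status := cd.get? pod_name
    if prev_status ≠ curr_status then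
      changes ++ [[("pod_name", some pod_name), ("previous_status", prev_status), ("current_status", curr_status)]]
    else changes) []

-- ===== PORT B =====
-- one change record {pod_name, previous_status, current_status}
def pvRec (k : String) (p c : Option String) : List (String × Option String) :=
  [("pod_name", some k), ("previous_status", p), ("current_status", c)]

-- the two while-loops over the two key-sorted item lists, as one recursion
def pvMerge : List (String × String) → List (String × String) → List (List (String × Option String))
  | [], [] => []
  | [], y :: ys => pvRec y.1 none (some y.2) :: pvMerge [] ys
  | x :: xs, [] => pvRec x.1 (some x.2) none :: pvMerge xs []
  | x :: xs, y :: ys =>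
    if x.1 < y.1 then pvRec x.1 (some x.2) none :: pvMerge xs (y :: ys)
    else if y.1 < x.1 then pvRec y.1 none (some y.2) :: pvMerge (x :: xs) ys
    else (if x.2 ≠ y.2 then [pvRec x.1 (some x.2) (some y.2)] else []) ++ pvMerge xs ys
termination_by xs ys => xs.length + ys.length
decreasing_by all_goals simp <;> omega

def detect_state_changes_alt (previous : List (String × String)) (current : List (String × String)) : List (List (String × Option String)) :=
  let pd := PySem.Dict.ofList previous
  let cd := PySem.Dict.ofList current
  pvMerge (PySem.List.sorted pd.items (fun kv => kv.1) false)
          (PySem.List.sorted cd.items (fun kv => kv.1) false)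

-- ===== PRECONDITION & SPEC =====
def Spec_detect_state_changes (previous : List (String × String)) (current : List (String × String)) (out : List (List (String × Option String))) : Prop := out = detect_state_changes_alt previous current
instance (previous : List (String × String)) (current : List (String × String)) (out : List (List (String × Option String))) : Decidable (Spec_detect_state_changes previous current out) := by unfold Spec_detect_state_changes; infer_instance

-- ===== CLAIM (what is proved, stated in full; the proofs are below) =====
def Claim_equal_detect_state_changes : Prop := ∀ (previous : List (String × String)) (current : List (String × String)), Dom_detect_state_changes previous current → Spec_detect_state_changes previous current (detect_state_changes previous current)

-- ===== LEMMAS AND PROOFS =====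

-- first-match lookup in an association list
def pvLk (l : List (String × String)) (k : String) : Option String :=
  (l.find? (fun p => decide (p.1 = k))).map (·.2)

theorem pvLk_nil (k : String) : pvLk [] k = none := rfl

theorem pvLk_cons (p : String × String) (l : List (String × String)) (k : String) :
    pvLk (p :: l) k = if p.1 = k then some p.2 else pvLk l k := by
  simp [pvLk, List.find?]
  split_ifs with h <;> simp_all

theorem pvLk_eq_none_of_forall (l : List (String × String)) (k : String)
    (h : ∀ p ∈ l, p.1 ≠ k) : pvLk l k = none := by
  induction l with
  | nil => rfl
  | cons p l ih =>
    rw [pvLk_cons]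
    rw [if_neg (h p (List.mem_cons_self))]
    exact ih (fun q hq => h q (List.mem_cons_of_mem _ hq))

theorem pvLk_ne_none_mem (l : List (String × String)) (k : String)
    (h : pvLk l k ≠ none) : k ∈ l.map Prod.fst := by
  by_contra hk
  exact h (pvLk_eq_none_of_forall l k (fun p hp hpk => hk (hpk ▸ List.mem_map_of_mem hp)))

theorem pvLk_some_iff_mem (l : List (String × String)) (k : String) (v : String)
    (hnd : (l.map Prod.fst).Nodup) : pvLk l k = some v ↔ (k, v) ∈ l := by
  induction l with
  | nil => simp [pvLk_nil]
  | cons p l ih =>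
    simp only [List.map_cons, List.nodup_cons] at hnd
    rw [pvLk_cons]
    split_ifs with h
    · subst h
      simp only [List.mem_cons, Option.some_inj]
      constructor
      · rintro rfl; exact Or.inl rfl
      · rintro (h | h)
        · have : (p.1, v).2 = p.2 := congrArg Prod.snd h
          simp at this; exact this.symm
        · exact absurd (List.mem_map_of_mem h) hnd.1
    · rw [ih hnd.2]
      simp only [List.mem_cons]
      constructor
      · exact Or.inr
      · rintro (hh | hh)
        · exact absurd (congrArg Prod.fst hh).symm h
        · exact hh

-- key extractor on a record
def pvKey (r : List (String × Option String)) : String :=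
  ((r.headD ("", none)).2).getD ""

theorem pvKey_rec (k : String) (p c : Option String) : pvKey (pvRec k p c) = k := rfl

-- membership characterisation of the merge, under strict key-sortedness
theorem mem_pvMerge (xs ys : List (String × String))
    (hx : xs.Pairwise (fun a b => a.1 < b.1)) (hy : ys.Pairwise (fun a b => a.1 < b.1))
    (r : List (String × Option String)) :
    r ∈ pvMerge xs ys ↔ ∃ k, pvLk xs k ≠ pvLk ys k ∧ r = pvRec k (pvLk xs k) (pvLk ys k) := by
  induction xs, ys using pvMerge.induct with
  | case1 =>
    simp [pvMerge, pvLk_nil]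
  | case2 y ys ih =>
    rw [List.pairwise_cons] at hy
    rw [pvMerge, List.mem_cons, ih List.Pairwise.nil hy.2]
    constructor
    · rintro (rfl | ⟨k, hk, rfl⟩)
      · exact ⟨y.1, by simp [pvLk_nil, pvLk_cons]⟩
      · have hyk : y.1 ≠ k := by
          rintro rfl
          exact hk (by rw [pvLk_nil,
            pvLk_eq_none_of_forall ys y.1 (fun p hp => (hy.1 p hp).ne')])
        exact ⟨k, by rw [pvLk_cons, if_neg hyk]; exact hk,
               by rw [pvLk_cons, if_neg hyk]⟩
    · rintro ⟨k, hk, rfl⟩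
      by_cases h : y.1 = k
      · subst h
        exact Or.inl (by rw [pvLk_nil, pvLk_cons, if_pos rfl])
      · rw [pvLk_cons, if_neg h] at hk ⊢
        exact Or.inr ⟨k, hk, rfl⟩
  | case3 x xs ih =>
    rw [List.pairwise_cons] at hx
    rw [pvMerge, List.mem_cons, ih hx.2 List.Pairwise.nil]
    constructor
    · rintro (rfl | ⟨k, hk, rfl⟩)
      · exact ⟨x.1, by simp [pvLk_nil, pvLk_cons]⟩
      · have hxk : x.1 ≠ k := by
          rintro rfl
          exact hk (by rw [pvLk_nil,
            pvLk_eq_none_of_forall xs x.1 (fun p hp => (hx.1 p hp).ne')])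
        exact ⟨k, by rw [pvLk_cons, if_neg hxk]; exact hk,
               by rw [pvLk_cons, if_neg hxk]⟩
    · rintro ⟨k, hk, rfl⟩
      by_cases h : x.1 = k
      · subst h
        exact Or.inl (by rw [pvLk_nil, pvLk_cons, if_pos rfl])
      · rw [pvLk_cons, if_neg h] at hk ⊢
        exact Or.inr ⟨k, hk, rfl⟩
  | case4 x xs y ys hlt ih =>
    rw [List.pairwise_cons] at hx
    rw [pvMerge, if_pos hlt, List.mem_cons, ih hx.2 hy]
    have hyn : pvLk (y :: ys) x.1 = none := by
      refine pvLk_eq_none_of_forall _ _ ?_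
      intro p hp
      rw [List.mem_cons] at hp
      rcases hp with rfl | hp
      · exact (ne_of_gt hlt)
      · exact ne_of_gt (hlt.trans ((List.pairwise_cons.mp hy).1 p hp))
    constructor
    · rintro (rfl | ⟨k, hk, rfl⟩)
      · exact ⟨x.1, by rw [hyn, pvLk_cons, if_pos rfl]; simp⟩
      · have hxk : x.1 ≠ k := by
          rintro rfl
          exact hk (by rw [hyn,
            pvLk_eq_none_of_forall xs x.1 (fun p hp => (hx.1 p hp).ne')])
        exact ⟨k, by rw [pvLk_cons x xs k, if_neg hxk]; exact hk,
               by rw [pvLk_cons x xs k, if_neg hxk]⟩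
    · rintro ⟨k, hk, rfl⟩
      by_cases h : x.1 = k
      · subst h
        exact Or.inl (by rw [hyn, pvLk_cons x xs x.1, if_pos rfl])
      · rw [pvLk_cons x xs k, if_neg h] at hk ⊢
        exact Or.inr ⟨k, hk, rfl⟩
  | case5 x xs y ys hnlt hlt ih =>
    rw [List.pairwise_cons] at hy
    rw [pvMerge, if_neg hnlt, if_pos hlt, List.mem_cons, ih hx hy.2]
    have hxn : pvLk (x :: xs) y.1 = none := by
      refine pvLk_eq_none_of_forall _ _ ?_
      intro p hp
      rw [List.mem_cons] at hp
      rcases hp with rfl | hp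
      · exact (ne_of_gt hlt)
      · exact ne_of_gt (hlt.trans ((List.pairwise_cons.mp hx).1 p hp))
    constructor
    · rintro (rfl | ⟨k, hk, rfl⟩)
      · exact ⟨y.1, by rw [hxn, pvLk_cons, if_pos rfl]; simp⟩
      · have hyk : y.1 ≠ k := by
          rintro rfl
          exact hk (by rw [hxn,
            pvLk_eq_none_of_forall ys y.1 (fun p hp => (hy.1 p hp).ne')])
        exact ⟨k, by rw [pvLk_cons y ys k, if_neg hyk]; exact hk,
               by rw [pvLk_cons y ys k, if_neg hyk]⟩
    · rintro ⟨k, hk, rfl⟩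
      by_cases h : y.1 = k
      · subst h
        exact Or.inl (by rw [hxn, pvLk_cons y ys y.1, if_pos rfl])
      · rw [pvLk_cons y ys k, if_neg h] at hk ⊢
        exact Or.inr ⟨k, hk, rfl⟩
  | case6 x xs y ys hnlt hnlt' ih =>
    have heq : x.1 = y.1 := le_antisymm (not_lt.mp hnlt') (not_lt.mp hnlt)
    rw [List.pairwise_cons] at hx hy
    rw [pvMerge, if_neg hnlt, if_neg hnlt', List.mem_append, ih hx.2 hy.2]
    constructor
    · rintro (hr | ⟨k, hk, rfl⟩)
      · refine ⟨x.1, ?_, ?_⟩ <;>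
          rw [pvLk_cons x xs x.1, if_pos rfl, pvLk_cons y ys x.1, if_pos heq.symm] <;>
          by_cases hv : x.2 = y.2 <;> simp [hv] at hr ⊢ <;> simp_all
      · have hxk : x.1 ≠ k := by
          rintro rfl
          exact hk (by rw [pvLk_eq_none_of_forall xs x.1 (fun p hp => (hx.1 p hp).ne'),
            pvLk_eq_none_of_forall ys x.1 (fun p hp => (heq ▸ (hy.1 p hp).ne'))])
        have hyk : y.1 ≠ k := heq ▸ hxk
        exact ⟨k, by rw [pvLk_cons x xs k, if_neg hxk, pvLk_cons y ys k, if_neg hyk]; exact hk,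
               by rw [pvLk_cons x xs k, if_neg hxk, pvLk_cons y ys k, if_neg hyk]⟩
    · rintro ⟨k, hk, rfl⟩
      by_cases h : x.1 = k
      · subst h
        left
        rw [pvLk_cons x xs x.1, if_pos rfl, pvLk_cons y ys x.1, if_pos heq.symm] at hk ⊢
        by_cases hv : x.2 = y.2 <;> simp [hv] at hk ⊢
      · have hyk : y.1 ≠ k := heq ▸ h
        rw [pvLk_cons x xs k, if_neg h, pvLk_cons y ys k, if_neg hyk] at hk ⊢
        exact Or.inr ⟨k, hk, rfl⟩

-- every record of the merge carries a key from one of the two lists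
theorem key_mem_pvMerge (xs ys : List (String × String))
    (hx : xs.Pairwise (fun a b => a.1 < b.1)) (hy : ys.Pairwise (fun a b => a.1 < b.1))
    (r : List (String × Option String)) (hr : r ∈ pvMerge xs ys) :
    pvKey r ∈ xs.map Prod.fst ∨ pvKey r ∈ ys.map Prod.fst := by
  obtain ⟨k, hk, rfl⟩ := (mem_pvMerge xs ys hx hy r).mp hr
  rw [pvKey_rec]
  by_cases h : pvLk xs k = none
  · exact Or.inr (pvLk_ne_none_mem ys k (fun hc => hk (h.trans hc.symm)))
  · exact Or.inl (pvLk_ne_none_mem xs k h)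

-- the merge output is strictly increasing in pod name
theorem pairwise_pvMerge (xs ys : List (String × String))
    (hx : xs.Pairwise (fun a b => a.1 < b.1)) (hy : ys.Pairwise (fun a b => a.1 < b.1)) :
    (pvMerge xs ys).Pairwise (fun a b => pvKey a < pvKey b) := by
  induction xs, ys using pvMerge.induct with
  | case1 => rw [pvMerge]; exact List.Pairwise.nil
  | case2 y ys ih =>
    rw [List.pairwise_cons] at hy
    rw [pvMerge, List.pairwise_cons]
    refine ⟨?_, ih List.Pairwise.nil hy.2⟩
    intro r hr
    rcases key_mem_pvMerge _ _ List.Pairwise.nil hy.2 r hr with h | h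
    · simp at h
    · obtain ⟨p, hp, hpk⟩ := List.mem_map.mp h
      exact pvKey_rec _ _ _ ▸ hpk ▸ hy.1 p hp
  | case3 x xs ih =>
    rw [List.pairwise_cons] at hx
    rw [pvMerge, List.pairwise_cons]
    refine ⟨?_, ih hx.2 List.Pairwise.nil⟩
    intro r hr
    rcases key_mem_pvMerge _ _ hx.2 List.Pairwise.nil r hr with h | h
    · obtain ⟨p, hp, hpk⟩ := List.mem_map.mp h
      exact pvKey_rec _ _ _ ▸ hpk ▸ hx.1 p hp
    · simp at h
  | case4 x xs y ys hlt ih =>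
    rw [List.pairwise_cons] at hx
    rw [pvMerge, if_pos hlt, List.pairwise_cons]
    refine ⟨?_, ih hx.2 hy⟩
    intro r hr
    rcases key_mem_pvMerge _ _ hx.2 hy r hr with h | h
    · obtain ⟨p, hp, hpk⟩ := List.mem_map.mp h
      exact pvKey_rec _ _ _ ▸ hpk ▸ hx.1 p hp
    · obtain ⟨p, hp, hpk⟩ := List.mem_map.mp h
      rw [List.mem_cons] at hp
      rcases hp with rfl | hp
      · exact pvKey_rec _ _ _ ▸ hpk ▸ hlt
      · exact pvKey_rec _ _ _ ▸ hpk ▸ hlt.trans ((List.pairwise_cons.mp hy).1 p hp)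
  | case5 x xs y ys hnlt hlt ih =>
    rw [List.pairwise_cons] at hy
    rw [pvMerge, if_neg hnlt, if_pos hlt, List.pairwise_cons]
    refine ⟨?_, ih hx hy.2⟩
    intro r hr
    rcases key_mem_pvMerge _ _ hx hy.2 r hr with h | h
    · obtain ⟨p, hp, hpk⟩ := List.mem_map.mp h
      rw [List.mem_cons] at hp
      rcases hp with rfl | hp
      · exact pvKey_rec _ _ _ ▸ hpk ▸ hlt
      · exact pvKey_rec _ _ _ ▸ hpk ▸ hlt.trans ((List.pairwise_cons.mp hx).1 p hp)
    · obtain ⟨p, hp, hpk⟩ := List.mem_map.mp h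
      exact pvKey_rec _ _ _ ▸ hpk ▸ hy.1 p hp
  | case6 x xs y ys hnlt hnlt' ih =>
    have heq : x.1 = y.1 := le_antisymm (not_lt.mp hnlt') (not_lt.mp hnlt)
    rw [List.pairwise_cons] at hx hy
    rw [pvMerge, if_neg hnlt, if_neg hnlt']
    have htail : ∀ r ∈ pvMerge xs ys, x.1 < pvKey r := by
      intro r hr
      rcases key_mem_pvMerge _ _ hx.2 hy.2 r hr with h | h
      · obtain ⟨p, hp, hpk⟩ := List.mem_map.mp h
        exact hpk ▸ hx.1 p hp
      · obtain ⟨p, hp, hpk⟩ := List.mem_map.mp h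
        exact hpk ▸ heq ▸ hy.1 p hp
    by_cases hv : x.2 = y.2
    · simp only [hv, ne_eq, not_true_eq_false, ite_false]
      simpa using ih hx.2 hy.2
    · rw [if_pos hv, List.singleton_append, List.pairwise_cons]
      exact ⟨fun r hr => pvKey_rec _ _ _ ▸ htail r hr, ih hx.2 hy.2⟩

-- the sorted item list of a dict: strictly key-sorted, and pvLk agrees with get?
theorem sorted_items_pairwise (l : List (String × String)) :
    (PySem.List.sorted (PySem.Dict.ofList l).items (fun kv => kv.1) false).Pairwise
      (fun a b => a.1 < b.1) := by
  have h1 := PySem.List.sorted_pairwise (PySem.Dict.ofList l).items (fun kv => kv.1)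
  have hnd : ((PySem.List.sorted (PySem.Dict.ofList l).items (fun kv => kv.1) false).map
      Prod.fst).Nodup := by
    refine ((PySem.List.sorted_perm _ _ _).map Prod.fst).nodup_iff.mpr ?_
    exact PySem.Dict.nodup_keys_ofList l
  rw [List.Nodup, List.pairwise_map] at hnd
  exact (h1.and hnd).imp (fun h => lt_of_le_of_ne h.1 h.2)

theorem pvLk_sorted_items (l : List (String × String)) (k : String) :
    pvLk (PySem.List.sorted (PySem.Dict.ofList l).items (fun kv => kv.1) false) k
      = (PySem.Dict.ofList l).get? k := by
  set d := PySem.Dict.ofList l with hd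
  set xs := PySem.List.sorted d.items (fun kv => kv.1) false with hxs
  have hndk : d.keys.Nodup := PySem.Dict.nodup_keys_ofList l
  have hnd : (xs.map Prod.fst).Nodup :=
    ((PySem.List.sorted_perm _ _ _).map Prod.fst).nodup_iff.mpr hndk
  cases hg : d.get? k with
  | none =>
    refine pvLk_eq_none_of_forall xs k ?_
    intro p hp hpk
    have hpm : (p.1, p.2) ∈ d.items := by
      have h := (PySem.List.mem_sorted _ _ _ _).mp hp
      simpa using h
    rw [hpk] at hpm
    have h2 := PySem.Dict.get?_of_mem_items d hpm hndk
    rw [hg] at h2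
    simp at h2
  | some v =>
    rw [pvLk_some_iff_mem xs k v hnd, PySem.List.mem_sorted]
    exact PySem.Dict.mem_items_of_get?_eq_some d hg

-- strictly increasing key order forces equality of permuted lists
theorem eq_of_perm_of_key_sorted (l1 l2 : List (List (String × Option String)))
    (hp : l1.Perm l2) (h1 : l1.Pairwise (fun a b => pvKey a < pvKey b))
    (h2 : l2.Pairwise (fun a b => pvKey a < pvKey b)) : l1 = l2 := by
  refine List.Perm.eq_of_pairwise (le := fun a b => pvKey a < pvKey b ∨ a = b) ?_
    (h1.imp (fun h => Or.inl h)) (h2.imp (fun h => Or.inl h)) hp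
  rintro a b _ _ (h | rfl) (h' | h')
  · exact absurd h' (asymm h)
  · exact h'.symm
  · rfl
  · rfl

theorem detect_main (previous current : List (String × String)) :
    detect_state_changes previous current = detect_state_changes_alt previous current := by
  unfold detect_state_changes detect_state_changes_alt
  set pd := PySem.Dict.ofList previous with hpd
  set cd := PySem.Dict.ofList current with hcd
  simp only [PySem.List.foldl_append_ite, List.nil_append]
  set g : String → Bool := fun pod => decide (pd.get? pod ≠ cd.get? pod) with hg
  set tr : String → List (String × Option String) :=
    fun pod => [("pod_name", some pod), ("previous_status", pd.get? pod),
                ("current_status", cd.get? pod)] with htr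
  set U := PySem.Set.union (PySem.Set.ofList pd.keys) (PySem.Set.ofList cd.keys) with hU
  set xs := PySem.List.sorted pd.items (fun kv => kv.1) false with hxs
  set ys := PySem.List.sorted cd.items (fun kv => kv.1) false with hys
  have hx : xs.Pairwise (fun a b => a.1 < b.1) := sorted_items_pairwise previous
  have hy : ys.Pairwise (fun a b => a.1 < b.1) := sorted_items_pairwise current
  have hlkx : ∀ k, pvLk xs k = pd.get? k := fun k => pvLk_sorted_items previous k
  have hlky : ∀ k, pvLk ys k = cd.get? k := fun k => pvLk_sorted_items current k
  set LA := ((PySem.List.sorted U (fun x => x) false).filter g).map tr with hLA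
  -- A's output is strictly increasing in pod name
  have hpwA : LA.Pairwise (fun a b => pvKey a < pvKey b) := by
    rw [hLA, List.pairwise_map]
    have : ((PySem.List.sorted U (fun x => x) false).filter g).Pairwise (· < ·) := by
      refine List.Pairwise.sublist List.filter_sublist ?_
      have h1 := PySem.List.sorted_pairwise U (fun x => x)
      have h2 : (PySem.List.sorted U (fun x => x) false).Nodup :=
        ((PySem.List.sorted_perm U (fun x => x) false).nodup_iff).mpr
          (PySem.Set.nodup_union _ _ (PySem.Set.nodup_ofList _))
      exact (h1.and h2).imp (fun h => lt_of_le_of_ne h.1 h.2)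
    exact this.imp (fun h => by simpa [htr, pvKey] using h)
  have hpwB := pairwise_pvMerge xs ys hx hy
  -- same members
  have hmem : ∀ r, r ∈ pvMerge xs ys ↔ r ∈ LA := by
    intro r
    rw [mem_pvMerge xs ys hx hy r, hLA, List.mem_map]
    constructor
    · rintro ⟨k, hk, rfl⟩
      rw [hlkx, hlky] at hk ⊢
      refine ⟨k, ?_, rfl⟩
      rw [List.mem_filter, PySem.List.mem_sorted]
      refine ⟨?_, by simpa [hg] using hk⟩
      rw [hU, PySem.Set.mem_union, PySem.Set.mem_ofList, PySem.Set.mem_ofList]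
      by_cases h : pd.get? k = none
      · right
        by_contra hnm
        exact hk (h.trans ((PySem.Dict.get?_eq_none_iff_not_mem_keys cd k).mpr hnm).symm)
      · left
        by_contra hnm
        exact h ((PySem.Dict.get?_eq_none_iff_not_mem_keys pd k).mpr hnm)
    · rintro ⟨k, hk, rfl⟩
      rw [List.mem_filter] at hk
      exact ⟨k, by rw [hlkx, hlky]; simpa [hg] using hk.2, by rw [hlkx, hlky]; rfl⟩
  -- both sides nodup (strict key order), hence perm, hence equal
  have hndA : LA.Nodup := by
    refine hpwA.imp ?_
    intro a b h he
    subst he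
    exact lt_irrefl _ h
  have hndB : (pvMerge xs ys).Nodup := by
    refine hpwB.imp ?_
    intro a b h he
    subst he
    exact lt_irrefl _ h
  have hperm : LA.Perm (pvMerge xs ys) := by
    rw [List.perm_ext_iff_of_nodup hndA hndB]
    intro r; exact (hmem r).symm
  exact eq_of_perm_of_key_sorted _ _ hperm hpwA hpwB

-- ===== VERDICT (by name: the statement is the Claim_ definition above) =====
theorem detect_state_changes_spec : Claim_equal_detect_state_changes := by
  intro previous current _
  unfold Spec_detect_state_changes
  exact detect_main previous current
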